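-- pv_equiv track=rewrite | github.com/cutehammond772/problem-solving-archive | 백준/Gold/17395. 이진수 변환/이진수 변환.py | solve
-- ===== SOURCE A (Python) =====
-- def solve(X, N, Q):
--   if len(Q) < N:
--     return [-1]
--
--   if N == 1:
--     return [0]
--
--   # 최대값을 최소화, 최소값을 최대화해야 한다.
--   # 최대값의 최소는 최상위 숫자 1이며, 최소값의 최대는 하위 숫자를 전부 더한 것이다.
--   result = [X - sum(Q[:(offset := len(Q) - (N - 1))])]
--
--   for k in range(offset + 1, len(Q) + 1):
--     result.append(X - sum(Q[:k]))
--
--   return result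
-- ===== SOURCE B (Python) =====
-- def solve(X, N, Q):
--     if len(Q) < N:
--         return [-1]
--     if N == 1:
--         return [0]
--
--     # One total sum, then peel trailing elements off it with a running
--     # subtraction, building the answers back-to-front in a single pass.
--     s = sum(Q)
--     out = [X - s]
--     for q in reversed(Q[len(Q) - (N - 1):]):
--         s -= q
--         out.append(X - s)
--     out.reverse()
--     return out
-- ===== Notes on version B (the rewrite author's own statement) =====
-- stated objective: faster
-- what changed: B computes the total sum of Q once and peels trailing elements off it with a running subtraction, building the answers back-to-front in one pass, instead of A re-summing the growing slice Q[:k] from scratch for every output element.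
import Mathlib
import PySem

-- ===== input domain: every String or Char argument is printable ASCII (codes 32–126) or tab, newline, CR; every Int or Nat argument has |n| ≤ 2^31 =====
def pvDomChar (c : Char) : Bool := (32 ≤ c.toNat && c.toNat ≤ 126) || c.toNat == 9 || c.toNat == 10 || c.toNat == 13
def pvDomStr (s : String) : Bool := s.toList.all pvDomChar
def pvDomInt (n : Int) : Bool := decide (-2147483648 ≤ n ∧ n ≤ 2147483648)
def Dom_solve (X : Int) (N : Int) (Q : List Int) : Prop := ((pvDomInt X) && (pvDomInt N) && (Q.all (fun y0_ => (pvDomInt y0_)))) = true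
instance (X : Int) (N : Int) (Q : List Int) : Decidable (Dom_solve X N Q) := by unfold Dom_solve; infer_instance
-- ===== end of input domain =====

-- B computes sum(Q) once and peels trailing elements off it with a running
-- subtraction, building the answers back-to-front in one pass, instead of A
-- re-summing the growing slice Q[:k] for every output element (objective: faster).

-- ===== PORT A =====
def solve (X : Int) (N : Int) (Q : List Int) : List Int :=
  if (Q.length : Int) < N then [-1]
  else if N = 1 then [0]
  else
    let offset : Int := (Q.length : Int) - (N - 1)
    let result : List Int := [X - (PySem.List.slice Q none (some offset)).sum]
    (PySem.List.pyRange (offset + 1) ((Q.length : Int) + 1) 1).foldl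
      (fun acc k => acc ++ [X - (PySem.List.slice Q none (some k)).sum]) result

-- ===== PORT B =====
def solve_alt (X : Int) (N : Int) (Q : List Int) : List Int :=
  if (Q.length : Int) < N then [-1]
  else if N = 1 then [0]
  else
    let s : Int := Q.sum
    -- 'for q in reversed(Q[len(Q)-(N-1):]): s -= q; out.append(X - s)'
    let st : Int × List Int :=
      ((PySem.List.slice Q (some ((Q.length : Int) - (N - 1))) none).reverse).foldl
        (fun st q => (st.1 - q, st.2 ++ [X - (st.1 - q)])) (s, [X - s])
    st.2.reverse

-- ===== PRECONDITION & SPEC =====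
def Spec_solve (X : Int) (N : Int) (Q : List Int) (out : List Int) : Prop := out = solve_alt X N Q
instance (X : Int) (N : Int) (Q : List Int) (out : List Int) : Decidable (Spec_solve X N Q out) := by unfold Spec_solve; infer_instance

-- ===== CLAIM =====
def Claim_equal_solve : Prop := ∀ (X : Int) (N : Int) (Q : List Int), Dom_solve X N Q → Spec_solve X N Q (solve X N Q)

-- ===== LEMMAS AND PROOFS =====

-- B's loop: running subtraction s, appending X - s at each step.
lemma bfold (X : Int) (l : List Int) (s : Int) (out : List Int) :
    l.foldl (fun st q => (st.1 - q, st.2 ++ [X - (st.1 - q)])) (s, out)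
      = (s - l.sum, out ++ (List.range l.length).map (fun i => X - (s - (l.take (i+1)).sum))) := by
  induction l generalizing s out with
  | nil => simp
  | cons q t ih =>
    rw [List.foldl_cons, ih, Prod.mk.injEq]
    constructor
    · simp [List.sum_cons]; ring
    · rw [List.length_cons, List.range_succ_eq_map, List.map_cons, List.map_map,
        List.append_assoc, List.singleton_append]
      have hmap : ∀ a ∈ List.range t.length,
          ((fun i => X - (s - ((q :: t).take (i+1)).sum)) ∘ Nat.succ) a
            = (fun i => X - ((s - q) - (t.take (i+1)).sum)) a := by
        intro a _
        simp only [Function.comp_apply, List.take_succ_cons, List.sum_cons]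
        ring
      rw [List.map_congr_left hmap]
      simp

-- sum of the first k elements of l read from the back
lemma sum_take_reverse (l : List Int) (k : ℕ) :
    (l.reverse.take k).sum = l.sum - (l.take (l.length - k)).sum := by
  rw [List.take_reverse, List.sum_reverse]
  have h := List.take_append_drop (l.length - k) l
  have : (l.take (l.length - k)).sum + (l.drop (l.length - k)).sum = l.sum := by
    rw [← List.sum_append, h]
  omega

-- ===== VERDICT =====
theorem solve_spec : Claim_equal_solve := by
  intro X N Q _
  unfold Spec_solve solve solve_alt
  by_cases hlen : (Q.length : Int) < N
  · simp [hlen]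
  · simp only [hlen, if_false]
    by_cases h1 : N = 1
    · simp [h1]
    · simp only [h1, if_false]
      set n : ℕ := Q.length with hn
      have hNn : N ≤ (n : Int) := le_of_not_gt hlen
      set off : Int := (n : Int) - (N - 1) with hoff
      by_cases h2 : 2 ≤ N
      · -- main case: 2 ≤ N ≤ n, so 1 ≤ off ≤ n - 1
        obtain ⟨j, hj⟩ : ∃ j : ℕ, (j : Int) = off := ⟨off.toNat, Int.toNat_of_nonneg (by omega)⟩
        have hjn : j ≤ n := by omega
        set m : ℕ := n - j with hm
        have htail_len : (Q.drop j).length = m := by simp [hn, hm]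
        -- A's side: [X - take j sum] ++ map over k = j+1 .. n
        rw [PySem.List.foldl_append_singleton_eq_map, ← hj, PySem.List.slice_to_natCast,
          PySem.List.pyRange_one]
        have htn : (((n : Int) + 1) - ((j : Int) + 1)).toNat = m := by omega
        rw [htn, List.map_map]
        -- B's side: rewrite the fold
        rw [PySem.List.slice_from_natCast]
        simp only [bfold, List.length_reverse, htail_len, List.sum_reverse]
        rw [List.singleton_append, List.singleton_append]
        -- both sides elementwise
        apply List.ext_getElem
        · simp
        · intro k hk1 hk2
          simp only [List.length_cons, List.length_map, List.length_range] at hk1 hk2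
          rw [List.getElem_reverse]
          simp only [List.length_cons, List.length_map, List.length_range]
          by_cases hkm : k = m
          · subst hkm
            rw [getElem_congr_idx (show m + 1 - 1 - m = 0 by omega),
              List.getElem_cons_zero, List.getElem_cons]
            split
            · -- m = 0, so j = n: take j Q = Q
              rw [List.take_of_length_le (by omega : Q.length ≤ j)]
            · next hne =>
              rw [List.getElem_map, List.getElem_range, Function.comp_apply]
              have hA : (j:Int) + 1 + ((m - 1 : ℕ) : Int) = ((n : ℕ) : Int) := by
                omega
              rw [hA, PySem.List.slice_to_natCast,
                List.take_of_length_le (by omega : Q.length ≤ n)]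
          · have hkm' : k < m := by omega
            rw [getElem_congr_idx (show m + 1 - 1 - k = (m - k - 1) + 1 by omega),
              List.getElem_cons_succ, List.getElem_map, List.getElem_range]
            rw [List.getElem_cons]
            split
            · -- k = 0
              next h0 =>
              have hiv : m - k - 1 + 1 = m - k := by omega
              rw [hiv, sum_take_reverse _ _]
              rw [htail_len]
              have hdd : m - (m - k) = k := by omega
              rw [hdd]
              have hsplit : (Q.take j).sum + (Q.drop j).sum = Q.sum := by
                rw [← List.sum_append, List.take_append_drop]
              subst h0
              simp only [List.take_zero, List.sum_nil]
              omega
            · next hne2 =>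
              rw [List.getElem_map, List.getElem_range, Function.comp_apply]
              have hiv : m - k - 1 + 1 = m - k := by omega
              rw [hiv, sum_take_reverse _ _]
              rw [htail_len]
              have hdd : m - (m - k) = k := by omega
              rw [hdd]
              have hsplit : (Q.take j).sum + (Q.drop j).sum = Q.sum := by
                rw [← List.sum_append, List.take_append_drop]
              have htadd : (Q.take (j + k)).sum = (Q.take j).sum + ((Q.drop j).take k).sum := by
                rw [List.take_add, List.sum_append]
              have hA : (j:Int) + 1 + ((k - 1 : ℕ) : Int) = (((j + k : ℕ)) : Int) := by
                push_cast; omega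
              rw [hA, PySem.List.slice_to_natCast]
              omega
      · -- degenerate case N ≤ 0: off ≥ n + 1, both sides are [X - Q.sum]
        have hN0 : N ≤ 0 := by omega
        have hoffn : (n : Int) + 1 ≤ off := by omega
        rw [PySem.List.pyRange_one_eq_nil (by omega), List.foldl_nil]
        rw [PySem.List.slice_to Q (by omega : (0:Int) ≤ off),
          List.take_of_length_le (by omega : n ≤ off.toNat)]
        rw [PySem.List.slice_from Q (by omega : (0:Int) ≤ off),
          List.drop_eq_nil_of_le (by omega : n ≤ off.toNat)]
        simp
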